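-- pv_equiv track=rewrite | github.com/projectacrn/acrn-hypervisor | misc/config_tools/board_inspector/acpiparser/aml/parser.py | get_package_length
-- ===== SOURCE A (Python) =====
-- def get_package_length(byte_count, value):
--     if byte_count == 0:
--         total_size = (value & 0x3F)
--     else:
--         total_size = value & 0x0F
--         for i in range(1, byte_count + 1):
--             byte = (value & (0xFF << (i * 8))) >> (i * 8)
--             total_size |= (byte << (i * 8 - 4))
--     return total_size
-- ===== SOURCE B (Python) =====
-- def get_package_length(byte_count, value):
--     if byte_count == 0:
--         return value & 0x3F
--     mask = ((1 << (8 * byte_count)) - 1) << 4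
--     return (value & 0x0F) | ((value >> 4) & mask)
-- ===== Notes on version B (the rewrite author's own statement) =====
-- stated objective: faster
-- what changed: The per-byte extraction loop is replaced by a single closed-form bitmask: the reassembled value is (value & 0x0F) | ((value >> 4) & (((1 << (8*byte_count)) - 1) << 4)), computed with no iteration.
-- outside the precondition, e.g. on get_package_length(-1, 100): A returns 4, B raises ValueError
import Mathlib
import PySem

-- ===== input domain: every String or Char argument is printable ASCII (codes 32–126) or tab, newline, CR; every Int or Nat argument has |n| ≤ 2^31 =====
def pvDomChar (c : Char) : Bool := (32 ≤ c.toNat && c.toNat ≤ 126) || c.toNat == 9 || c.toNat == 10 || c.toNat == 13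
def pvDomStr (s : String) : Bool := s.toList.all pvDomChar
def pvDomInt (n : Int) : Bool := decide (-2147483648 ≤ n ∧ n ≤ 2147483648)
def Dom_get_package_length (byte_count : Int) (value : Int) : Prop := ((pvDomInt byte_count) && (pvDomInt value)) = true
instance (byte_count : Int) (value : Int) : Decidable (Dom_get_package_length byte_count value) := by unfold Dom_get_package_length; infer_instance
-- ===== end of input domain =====

-- B replaces A's per-byte extraction loop by one closed-form bitmask window (measured faster); equivalence proved for byte_count ≥ 0.


-- ===== PORT A =====
-- literal port of A's loop; Python's 'x << k' is written 'x * 2 ^ k' and 'x >> k' is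
-- 'x / 2 ^ k' (exact: Lean's Int '/' is floor division for a positive divisor, which is
-- Python's '>>'); shift amounts i*8 and i*8-4 are positive for every i the range yields
-- (i ≥ 1), so .toNat is exact there
def get_package_length (byte_count : Int) (value : Int) : Int :=
  if byte_count = 0 then PySem.Int.band value 0x3F
  else
    (PySem.List.pyRange 1 (byte_count + 1) 1).foldl
      (fun total_size i =>
        let byte := PySem.Int.band value ((0xFF : Int) * 2 ^ (i * 8).toNat) / 2 ^ (i * 8).toNat
        PySem.Int.bor total_size (byte * 2 ^ (i * 8 - 4).toNat))
      (PySem.Int.band value 0x0F)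

-- ===== PORT B =====
-- closed-form bitmask, with shifts written as multiplication/floor division by powers of two
-- as in port A (exact); the shift amount 8*byte_count is positive whenever this branch runs
-- on the Pre_ domain (byte_count ≠ 0 and byte_count ≥ 0), so .toNat is exact there
def get_package_length_alt (byte_count : Int) (value : Int) : Int :=
  if byte_count = 0 then PySem.Int.band value 0x3F
  else
    PySem.Int.bor (PySem.Int.band value 0x0F)
      (PySem.Int.band (value / 2 ^ (4 : Nat)) (((1 : Int) * 2 ^ (8 * byte_count).toNat - 1) * 2 ^ (4 : Nat)))

-- ===== PRECONDITION & SPEC =====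
-- Pre_ excludes negative byte_count (outside the natural domain of a byte count): there A's loop
-- body never runs and A returns value & 0x0F, while B's '1 << (8*byte_count)' raises ValueError.
def Pre_get_package_length (byte_count : Int) (value : Int) : Prop := 0 ≤ byte_count
instance (byte_count : Int) (value : Int) : Decidable (Pre_get_package_length byte_count value) := by unfold Pre_get_package_length; infer_instance
def pvWitness_get_package_length : Int × Int := (2, 77777)

def Spec_get_package_length (byte_count : Int) (value : Int) (out : Int) : Prop := out = get_package_length_alt byte_count value
instance (byte_count : Int) (value : Int) (out : Int) : Decidable (Spec_get_package_length byte_count value out) := by unfold Spec_get_package_length; infer_instance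

-- ===== CLAIM (what is proved, stated in full; the proofs are below) =====
def Claim_equal_get_package_length : Prop := ∀ (byte_count : Int) (value : Int), Dom_get_package_length byte_count value → Pre_get_package_length byte_count value → Spec_get_package_length byte_count value (get_package_length byte_count value)

-- ===== LEMMAS AND PROOFS =====

-- bit window at the Nat level: x & ((2^k-1) << s) extracts bits s .. s+k-1
theorem pv_nat_window (x k s : Nat) :
    x &&& ((2 ^ k - 1) <<< s) = ((x >>> s) % 2 ^ k) <<< s := by
  apply Nat.eq_of_testBit_eq
  intro i
  simp only [Nat.testBit_and, Nat.testBit_shiftLeft, Nat.testBit_mod_two_pow,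
    Nat.testBit_two_pow_sub_one, Nat.testBit_shiftRight]
  by_cases h : s ≤ i
  · simp [h, Nat.add_sub_cancel' h]
    by_cases h2 : i - s < k <;> simp [h2, Bool.and_comm]
  · simp [h]

theorem pv_neg_succ_ediv (n d : Nat) (hd : 0 < d) :
    (-(n : Int) - 1) / (d : Int) = -((n / d : Nat) : Int) - 1 := by
  have h := Nat.div_add_mod n d
  have hlt : n % d < d := Nat.mod_lt _ hd
  have hrw : (-(n : Int) - 1) = ((d : Int) - 1 - ((n % d : Nat) : Int)) + (d : Int) * (-((n / d : Nat) : Int) - 1) := by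
    push_cast
    nlinarith [h]
  rw [hrw, Int.add_mul_ediv_left _ _ (by exact_mod_cast hd.ne' : (d : Int) ≠ 0)]
  have hz : ((d : Int) - 1 - ((n % d : Nat) : Int)) / (d : Int) = 0 := by
    apply Int.ediv_eq_zero_of_lt <;> omega
  omega

theorem pv_neg_succ_emod (n d : Nat) (hd : 0 < d) :
    (-(n : Int) - 1) % (d : Int) = (d : Int) - 1 - ((n % d : Nat) : Int) := by
  have h1 := pv_neg_succ_ediv n d hd
  have h2 := Int.emod_def (-(n : Int) - 1) (d : Int)
  have h := Nat.div_add_mod n d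
  rw [h1] at h2
  push_cast at h2 ⊢
  nlinarith [h2, h]

-- the Int-level window lemma, valid for EVERY integer a (two's-complement semantics)
theorem pv_band_window (a : Int) (k s : Nat) :
    PySem.Int.band a (((2 ^ k - 1) <<< s : Nat) : Int) = a / 2 ^ s % 2 ^ k * 2 ^ s := by
  have h1k : (1 : Nat) ≤ 2 ^ k := Nat.one_le_two_pow
  have hmn : (0 : Int) ≤ (((2 ^ k - 1) <<< s : Nat) : Int) := Int.natCast_nonneg _
  by_cases ha : 0 ≤ a
  · rw [PySem.Int.band_of_nonneg ha hmn, Int.toNat_natCast, pv_nat_window]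
    push_cast [Nat.shiftLeft_eq, Nat.shiftRight_eq_div_pow,
      Int.toNat_of_nonneg ha, Int.natCast_div, Int.natCast_emod]
    ring
  · set n : Nat := (-a - 1).toNat with hn
    have han : a = -(n : Int) - 1 := by
      have h0 : (0 : Int) ≤ -a - 1 := by omega
      rw [hn, Int.toNat_of_nonneg h0]; ring
    have hd1 : (0 : Nat) < 2 ^ s := Nat.two_pow_pos _
    have hd2 : (0 : Nat) < 2 ^ k := Nat.two_pow_pos _
    have hband : PySem.Int.band a (((2 ^ k - 1) <<< s : Nat) : Int)
        = ((((2 ^ k - 1) <<< s : Nat)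
            - (((2 ^ k - 1) <<< s : Nat) &&& (-a - 1).toNat) : Nat) : Int) := by
      rw [PySem.Int.band, if_neg (by omega), if_pos hmn, Int.toNat_natCast]
    rw [hband, ← hn]
    have hand : ((2 ^ k - 1) <<< s) &&& n = ((n >>> s) % 2 ^ k) <<< s := by
      rw [Nat.and_comm, pv_nat_window]
    rw [hand]
    have hsub : (2 ^ k - 1) <<< s - ((n >>> s) % 2 ^ k) <<< s
        = ((2 ^ k - 1) - (n >>> s) % 2 ^ k) <<< s := by
      simp [Nat.shiftLeft_eq, Nat.sub_mul]
    rw [hsub, han, show ((2 : Int) ^ s) = ((2 ^ s : Nat) : Int) by push_cast; ring,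
        show ((2 : Int) ^ k) = ((2 ^ k : Nat) : Int) by push_cast; ring,
        pv_neg_succ_ediv n (2 ^ s) hd1, pv_neg_succ_emod (n / 2 ^ s) (2 ^ k) hd2]
    have hle : (n >>> s) % 2 ^ k ≤ 2 ^ k - 1 := by
      have := Nat.mod_lt (n >>> s) hd2; omega
    have hle2 : n / 2 ^ s % 2 ^ k ≤ 2 ^ k - 1 := by
      have := Nat.mod_lt (n / 2 ^ s) hd2; omega
    push_cast [Nat.shiftLeft_eq, Nat.shiftRight_eq_div_pow, Nat.cast_sub hle, Nat.cast_sub h1k,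
      Nat.cast_sub hle2, Int.natCast_div, Int.natCast_emod]
    ring

-- OR of values occupying disjoint bit ranges is addition
theorem pv_bor_add (a b : Int) (t : Nat) (ha : 0 ≤ a) (hab : a < 2 ^ t) (hb : 0 ≤ b)
    (hdvd : ((2 : Int) ^ t) ∣ b) : PySem.Int.bor a b = a + b := by
  rw [PySem.Int.bor_of_nonneg ha hb]
  obtain ⟨c, hc⟩ := hdvd
  have hp : (0 : Int) < 2 ^ t := by positivity
  have hc0 : 0 ≤ c := by nlinarith
  have hbt : (b.toNat : Int) = ((c.toNat <<< t : Nat) : Int) := by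
    push_cast [Nat.shiftLeft_eq, Int.toNat_of_nonneg hb, Int.toNat_of_nonneg hc0]
    rw [hc]; ring
  have hbt' : b.toNat = c.toNat <<< t := by exact_mod_cast hbt
  have hcast : (((2 : Nat) ^ t : Nat) : Int) = (2 : Int) ^ t := by push_cast; ring
  have haN : a.toNat < 2 ^ t := by omega
  rw [hbt', Nat.or_comm, ← Nat.shiftLeft_add_eq_or_of_lt haN]
  push_cast [Nat.shiftLeft_eq, Int.toNat_of_nonneg ha, Int.toNat_of_nonneg hc0]
  rw [hc]; ring

-- base-2^8 digit recomposition step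
theorem pv_mod_mul (u m c : Int) (hm : 0 ≤ m) :
    u % (m * c) = u % m + m * (u / m % c) := by
  rw [Int.emod_def, Int.emod_def, Int.emod_def, ← Int.ediv_ediv_of_nonneg hm]
  ring

theorem pv_band_15 (v : Int) : PySem.Int.band v 0x0F = v % 16 := by
  have h : (0x0F : Int) = (((2 ^ 4 - 1) <<< 0 : Nat) : Int) := by norm_num
  rw [h, pv_band_window]
  norm_num

-- A's loop, closed form: after n iterations the low nibble plus the n reassembled bytes
theorem pv_loop (v : Int) : ∀ n : Nat,
    (PySem.List.pyRange 1 ((n : Int) + 1) 1).foldl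
      (fun total_size i =>
        let byte := PySem.Int.band v ((0xFF : Int) * 2 ^ (i * 8).toNat) / 2 ^ (i * 8).toNat
        PySem.Int.bor total_size (byte * 2 ^ (i * 8 - 4).toNat))
      (PySem.Int.band v 0x0F)
    = v % 16 + 16 * (v / 256 % 2 ^ (8 * n)) := by
  intro n
  induction n with
  | zero =>
    rw [show ((0 : Nat) : Int) + 1 = 1 by norm_num, PySem.List.pyRange_one_eq_nil le_rfl]
    simp [pv_band_15]
  | succ n ih =>
    have hcast : (((n + 1 : Nat)) : Int) + 1 = ((n : Int) + 1) + 1 := by push_cast; ring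
    rw [hcast, PySem.List.pyRange_one_succ_right (by omega : (1 : Int) ≤ (n : Int) + 1),
      List.foldl_append, ih]
    simp only [List.foldl_cons, List.foldl_nil]
    have e1 : (((n : Int) + 1) * 8).toNat = 8 * n + 8 := by omega
    have e2 : (((n : Int) + 1) * 8 - 4).toNat = 8 * n + 4 := by omega
    rw [e1, e2]
    have hmask : (0xFF : Int) * (2 : Int) ^ (8 * n + 8) = (((2 ^ 8 - 1) <<< (8 * n + 8) : Nat) : Int) := by
      push_cast [Nat.shiftLeft_eq]
      norm_num
    rw [hmask, pv_band_window,
      Int.mul_ediv_cancel _ (pow_ne_zero _ (by norm_num : (2 : Int) ≠ 0))]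
    have hr16 : 0 ≤ v % 16 ∧ v % 16 < 16 :=
      ⟨Int.emod_nonneg _ (by norm_num), Int.emod_lt_of_pos _ (by norm_num)⟩
    have hrn : 0 ≤ v / 256 % 2 ^ (8 * n) ∧ v / 256 % 2 ^ (8 * n) < 2 ^ (8 * n) :=
      ⟨Int.emod_nonneg _ (pow_ne_zero _ (by norm_num)),
       Int.emod_lt_of_pos _ (by positivity)⟩
    have hbyte : 0 ≤ v / 2 ^ (8 * n + 8) % 2 ^ 8 :=
      Int.emod_nonneg _ (pow_ne_zero _ (by norm_num))
    have hsplit : (2 : Int) ^ (8 * n + 4) = 2 ^ (8 * n) * 16 := by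
      rw [pow_add]; norm_num
    rw [pv_bor_add _ _ (8 * n + 4)
      (by nlinarith [hr16.1, hrn.1, pow_pos (by norm_num : (0 : Int) < 2) (8 * n)])
      (by nlinarith [hr16.2, hrn.2, pow_pos (by norm_num : (0 : Int) < 2) (8 * n)])
      (by positivity)
      (Dvd.intro_left _ rfl)]
    have hdd : v / 2 ^ (8 * n + 8) = v / 256 / 2 ^ (8 * n) := by
      rw [Int.ediv_ediv_of_nonneg (by norm_num : (0 : Int) ≤ 256),
        show (256 : Int) * 2 ^ (8 * n) = 2 ^ (8 * n + 8) by rw [pow_add]; ring_nf]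
    rw [hdd, show 8 * (n + 1) = 8 * n + 8 by ring,
      show (2 : Int) ^ (8 * n + 8) = 2 ^ (8 * n) * 2 ^ 8 by rw [pow_add],
      pv_mod_mul _ _ _ (by positivity : (0 : Int) ≤ (2 : Int) ^ (8 * n))]
    rw [hsplit]
    ring

-- ===== VERDICT (by name: the statement is the Claim_ definition above) =====
theorem get_package_length_spec : Claim_equal_get_package_length := by
  unfold Claim_equal_get_package_length
  intro bc v _ hpre
  unfold Spec_get_package_length get_package_length get_package_length_alt
  by_cases h0 : bc = 0
  · simp [h0]
  · rw [if_neg h0, if_neg h0]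
    have hbc : 0 < bc := lt_of_le_of_ne hpre (Ne.symm h0)
    have hbc' : bc = ((bc.toNat : Nat) : Int) := (Int.toNat_of_nonneg hpre).symm
    -- A side
    rw [show bc + 1 = ((bc.toNat : Nat) : Int) + 1 by omega, pv_loop]
    -- B side
    have hm : (8 * bc).toNat = 8 * bc.toNat := by omega
    rw [hm, pv_band_15]
    have h1 : ((1 : Int) * (2 : Int) ^ (8 * bc.toNat) - (1 : Int)) * (2 : Int) ^ (4 : Nat)
        = (((2 ^ (8 * bc.toNat) - 1) <<< 4 : Nat) : Int) := by
      push_cast [Nat.shiftLeft_eq, Nat.cast_sub (Nat.one_le_two_pow)]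
      ring
    rw [h1, pv_band_window]
    have hdd : v / 2 ^ (4 : Nat) / 2 ^ 4 = v / 256 := by
      rw [Int.ediv_ediv_of_nonneg (by norm_num : (0 : Int) ≤ (2 : Int) ^ (4 : Nat))]
      norm_num
    rw [hdd]
    have hb0 : 0 ≤ v % 16 := Int.emod_nonneg _ (by norm_num)
    have hb1 : v % 16 < 2 ^ 4 := Int.emod_lt_of_pos _ (by norm_num)
    have hb2 : 0 ≤ v / 256 % 2 ^ (8 * bc.toNat) * 2 ^ 4 := by
      have := Int.emod_nonneg (v / 256) (pow_ne_zero (8 * bc.toNat) (by norm_num : (2 : Int) ≠ 0))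
      positivity
    rw [pv_bor_add _ _ 4 hb0 hb1 hb2 (Dvd.intro_left _ rfl)]
    ring
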